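-- pv_equiv track=rewrite | github.com/Jokezor/code_puzzles | foo_bar_google/6.py | solution
-- ===== SOURCE A (Python) =====
-- import functools
--
-- def count_numbers_with_same_bit(num, current_power, next_power):
--     """
--     Counts the numbers less than num with a bit set in current_power.
--
--     current_power is the bit position we want to check given as 2^i
--     next_power is the next bit position we want to check given as a number 2^(i+1)
--     """
--     res = (num // next_power) * current_power
--     res += min(max(num % next_power - current_power + 1, 0), current_power)
--     return res
--
-- def solution(start, length):
--     """
--     Calculates the xor by considering the numbers row by row.
--
--     Does this by considering that only numbers with the same bit set will
--     affect each order when performing xor.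
--
--     Store each rows xor by calculating the numbers with same bit set.
--     If the count is odd, then it will be set for this row.
--     This is added to the index of rows.
--
--     Finally, the sequence is reduced by performing xor on each entry.
--     """
--     rows = [0] * length
--     powers_of_two = [1 << i for i in range(32)]
--
--     for row in range(length):
--         i = 0
--         smallest_in_row = start + row * length
--         biggest_in_row = smallest_in_row + length - row - 1
--
--         while powers_of_two[i] <= biggest_in_row:
--             num_b = count_numbers_with_same_bit(
--                 biggest_in_row, powers_of_two[i], powers_of_two[i + 1]
--             )
--             num_a = count_numbers_with_same_bit(
--                 max(smallest_in_row - 1,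
--                     0), powers_of_two[i], powers_of_two[i + 1]
--             )
--
--             # Calculate the numbers with bits that we have counted for b
--             # which should not be included
--             if smallest_in_row == biggest_in_row and (num_b - num_a):
--                 rows[row] += powers_of_two[i]
--             elif (num_b - num_a) % 2:
--                 rows[row] += powers_of_two[i]
--
--             i += 1
--
--     # Final result is to xor all the rows.
--     res = functools.reduce(lambda a, b: a ^ b, rows)
--
--     return res
-- ===== SOURCE B (Python) =====
-- def xor_upto(n):
--     # xor of all integers in [0, n]; 0 for an empty range (n < 0)
--     if n < 0:
--         return 0
--     return [n, 1, n + 1, 0][n % 4]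
--
--
-- def solution(start, length):
--     # Row r holds the consecutive integers [start + r*length, start + r*length + length - r - 1];
--     # its xor is the O(1) prefix-formula difference, instead of counting set bits per bit position.
--     res = 0
--     for row in range(length):
--         lo = start + row * length
--         hi = lo + length - row - 1
--         res ^= xor_upto(hi) ^ xor_upto(max(lo - 1, 0))
--     return res
-- ===== Notes on version B (the rewrite author's own statement) =====
-- stated objective: faster
-- what changed: Each row's xor is computed in O(1) with the prefix formula xor_upto(n)=[n,1,n+1,0][n%4] (row xor = xor_upto(hi) ^ xor_upto(max(lo-1,0))), replacing A's inner 32-step per-bit counting loop over count_numbers_with_same_bit.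
import Mathlib
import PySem

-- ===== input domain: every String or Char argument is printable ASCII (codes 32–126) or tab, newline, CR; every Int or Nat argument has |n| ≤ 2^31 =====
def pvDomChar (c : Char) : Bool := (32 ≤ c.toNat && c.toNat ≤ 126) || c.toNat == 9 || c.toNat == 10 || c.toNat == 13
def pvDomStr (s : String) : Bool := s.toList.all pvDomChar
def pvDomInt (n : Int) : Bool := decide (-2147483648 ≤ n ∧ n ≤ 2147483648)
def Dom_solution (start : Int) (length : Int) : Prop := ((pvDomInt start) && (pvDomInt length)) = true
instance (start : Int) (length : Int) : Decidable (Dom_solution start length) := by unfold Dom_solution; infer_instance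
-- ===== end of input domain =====

-- B replaces A's 32-step per-bit counting inner loop by the O(1) range-xor prefix formula
-- xor_upto(n) = [n, 1, n+1, 0][n % 4] per row (objective: faster by a constant factor).

-- ===== PORT A =====
def count_numbers_with_same_bit (num : Int) (current_power : Int) (next_power : Int) : Int :=
  let res := (PySem.Int.floordiv num next_power) * current_power
  res + min (max (PySem.Int.mod num next_power - current_power + 1) 0) current_power

-- powers_of_two = [1 << i for i in range(32)]
def powersOfTwo : List Int := (List.range 32).map (fun i => (1 : Int) <<< i)

-- the inner `while powers_of_two[i] <= biggest_in_row:` loop of A; an out-of-range list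
-- access (index 32, Python's IndexError) returns acc — such inputs are outside Pre_solution.
def solutionRowLoop (smallest biggest : Int) (i : Nat) (acc : Int) : Int :=
  if _h : i < 32 then
    if powersOfTwo.getD i 0 ≤ biggest then
      if _h2 : i + 1 < 32 then
        let p := powersOfTwo.getD i 0
        let num_b := count_numbers_with_same_bit biggest p (powersOfTwo.getD (i + 1) 0)
        let num_a := count_numbers_with_same_bit (max (smallest - 1) 0) p (powersOfTwo.getD (i + 1) 0)
        let acc' := if smallest = biggest ∧ num_b - num_a ≠ 0 then acc + p
                    else if PySem.Int.mod (num_b - num_a) 2 ≠ 0 then acc + p else acc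
        solutionRowLoop smallest biggest (i + 1) acc'
      else acc  -- powers_of_two[i+1]: IndexError (outside Pre_solution)
    else acc
  else acc  -- powers_of_two[i]: IndexError (unreachable from i = 0)
termination_by 32 - i

def solution (start : Int) (length : Int) : Int :=
  let rows := (PySem.List.pyRange 0 length 1).map (fun row =>
    let smallest_in_row := start + row * length
    let biggest_in_row := smallest_in_row + length - row - 1
    solutionRowLoop smallest_in_row biggest_in_row 0 0)
  -- functools.reduce(xor, rows); on the empty list Python raises TypeError (outside Pre_solution)
  match rows with
  | [] => 0
  | h :: t => t.foldl (fun a b => PySem.Int.bxor a b) h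

-- ===== PORT B =====
def xorUpto (n : Int) : Int :=
  if n < 0 then 0
  else
    -- [n, 1, n + 1, 0][n % 4], the list indexing written out as its four cases
    if PySem.Int.mod n 4 = 0 then n
    else if PySem.Int.mod n 4 = 1 then 1
    else if PySem.Int.mod n 4 = 2 then n + 1
    else 0

def solution_alt (start : Int) (length : Int) : Int :=
  (PySem.List.pyRange 0 length 1).foldl (fun res row =>
    let lo := start + row * length
    let hi := lo + length - row - 1
    PySem.Int.bxor res (PySem.Int.bxor (xorUpto hi) (xorUpto (max (lo - 1) 0)))) 0

-- ===== PRECONDITION & SPEC =====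
-- Pre_ is exactly where the Python A returns: length ≥ 1 (functools.reduce on the empty rows
-- list raises TypeError) and the largest row value start + length² - length below 2^31
-- (otherwise the while loop reaches powers_of_two[32] and raises IndexError).
def Pre_solution (start : Int) (length : Int) : Prop :=
  1 ≤ length ∧ start + length * length - length < 2147483648
instance (start : Int) (length : Int) : Decidable (Pre_solution start length) := by
  unfold Pre_solution; infer_instance

def pvWitness_solution : Int × Int := (17, 4)

def Spec_solution (start : Int) (length : Int) (out : Int) : Prop := out = solution_alt start length
instance (start : Int) (length : Int) (out : Int) : Decidable (Spec_solution start length out) := by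
  unfold Spec_solution; infer_instance

-- ===== CLAIM (what is proved, stated in full; the proofs are below) =====
def Claim_equal_solution : Prop := ∀ (start : Int) (length : Int), Dom_solution start length → Pre_solution start length → Spec_solution start length (solution start length)

-- ===== LEMMAS AND PROOFS =====

-- Nat-side mirrors used only by the proofs:
-- fN n = xor of 0..n (B's closed form on Nat), cntN n i = A's per-bit count on Nat
def fN (n : Nat) : Nat :=
  if n % 4 = 0 then n else if n % 4 = 1 then 1 else if n % 4 = 2 then n + 1 else 0

def cntN (n i : Nat) : Nat := n / 2 ^ (i + 1) * 2 ^ i + min (2 ^ i) (n % 2 ^ (i + 1) + 1 - 2 ^ i)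

lemma powersOfTwo_getD (i : Nat) (h : i < 32) : powersOfTwo.getD i 0 = 2 ^ i := by
  interval_cases i <;> decide

lemma xorUpto_natCast (n : Nat) : xorUpto (n : Int) = (fN n : Int) := by
  have h0 : ¬ ((n:Int) < 0) := by exact_mod_cast Int.not_lt.mpr (Int.natCast_nonneg n)
  have h4 : PySem.Int.mod (n:Int) 4 = ((n % 4 : Nat) : Int) := PySem.Int.mod_natCast n 4
  simp only [xorUpto, fN, h0, if_false, h4]
  split_ifs <;> omega

lemma fN_lt_pow (n i : Nat) (h : n < 2 ^ i) : fN n < 2 ^ i := by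
  unfold fN
  rcases Nat.lt_or_ge i 2 with hi | hi
  · interval_cases i <;> split_ifs <;> omega
  · have h4 : (4:Nat) ∣ 2 ^ i := ⟨2^(i-2), by rw [show (4:Nat) = 2^2 by norm_num, ← pow_add]; congr 1; omega⟩
    split_ifs <;> omega

lemma xor_div_pow_parity (x y i : Nat) :
    (x ^^^ y) / 2 ^ i % 2 = (x / 2 ^ i % 2 + y / 2 ^ i % 2) % 2 := by
  have h := Nat.testBit_xor x y i
  simp only [Nat.testBit, Nat.shiftRight_eq_div_pow, Nat.one_and_eq_mod_two] at h
  have hx : x / 2^i % 2 < 2 := Nat.mod_lt _ (by norm_num)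
  have hy : y / 2^i % 2 < 2 := Nat.mod_lt _ (by norm_num)
  have hz : (x ^^^ y) / 2^i % 2 < 2 := Nat.mod_lt _ (by norm_num)
  interval_cases hx' : x / 2^i % 2 <;> interval_cases hy' : y / 2^i % 2 <;>
    simp_all

lemma cnt_cast (n i : Nat) :
    count_numbers_with_same_bit (n : Int) ((2 ^ i : Nat) : Int) ((2 ^ (i + 1) : Nat) : Int)
      = (cntN n i : Int) := by
  simp only [count_numbers_with_same_bit, cntN, PySem.Int.floordiv_natCast, PySem.Int.mod_natCast]
  generalize n / 2 ^ (i+1) = D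
  generalize n % 2 ^ (i+1) = M
  generalize (2:Nat) ^ i = P
  push_cast
  have : ((min P (M + 1 - P) : Nat) : Int) = min (max ((M:Int) - P + 1) 0) P := by omega
  rw [← this]; push_cast; ring

lemma cntN_parity (n i : Nat) : cntN n i % 2 = fN n / 2 ^ i % 2 := by
  rcases Nat.eq_zero_or_pos i with rfl | hi
  · simp only [cntN, fN, pow_zero]
    split_ifs <;> omega
  · -- i ≥ 1 : write i = j+1, P' := 2^j so 2^i = 2*P', 2^(i+1) = 4*P'
    obtain ⟨j, rfl⟩ : ∃ j, i = j + 1 := ⟨i - 1, by omega⟩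
    have hP : (0:Nat) < 2 ^ j := pow_pos (by norm_num) j
    have h2 : (2:Nat) ^ (j+1) = 2 * 2^j := by ring
    have h4 : (2:Nat) ^ (j+1+1) = 4 * 2^j := by ring
    simp only [cntN, fN, h2, h4]
    generalize hPP : (2:Nat) ^ j = P at *
    -- decompose n
    have hdm := Nat.div_add_mod n (4 * P)
    have hmlt : n % (4 * P) < 4 * P := Nat.mod_lt _ (by omega)
    generalize hD : n / (4 * P) = D at *
    generalize hM : n % (4 * P) = M at *
    -- n % 4 = M % 4
    have hn4 : n % 4 = M % 4 := by
      have : n = 4 * (P * D) + M := by rw [← hdm]; ring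
      omega
    -- n / (2*P) = 2*D + M / (2*P)
    have hdiv : n / (2 * P) = 2 * D + M / (2 * P) := by
      have : n = 2 * P * (2 * D) + M := by rw [← hdm]; ring
      rw [this, Nat.mul_add_div (by omega)]
    have hMd : M / (2 * P) = if 2 * P ≤ M then 1 else 0 := by
      split_ifs with h
      · rw [Nat.div_eq_sub_div (by omega) h, Nat.div_eq_of_lt (by omega)]
      · exact Nat.div_eq_of_lt (by omega)
    -- (n+1) / (2*P) when M % 4 = 2
    have hdiv1 : M % 4 = 2 → (n+1) / (2 * P) = 2 * D + (M+1) / (2 * P) := by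
      intro hM2
      have : n + 1 = 2 * P * (2 * D) + (M + 1) := by rw [← hdm]; ring
      rw [this, Nat.mul_add_div (by omega)]
    have hMd1 : M % 4 = 2 → (M+1) / (2 * P) = if 2 * P ≤ M + 1 then 1 else 0 := by
      intro hM2
      split_ifs with h
      · have hne : M + 1 < 4 * P := by omega
        rw [Nat.div_eq_sub_div (by omega) h, Nat.div_eq_of_lt (by omega)]
      · exact Nat.div_eq_of_lt (by omega)
    -- first summand is even
    have key : (D * (2 * P) + min (2 * P) (M + 1 - 2 * P)) % 2 = min (2 * P) (M + 1 - 2 * P) % 2 := by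
      rw [show D * (2 * P) = 2 * (D * P) from by ring]
      omega
    rw [key]
    split_ifs with c1 c2 c3
    · -- n % 4 = 0 : fN n = n
      rw [hdiv, hMd]
      have : M % 4 = 0 := by omega
      split_ifs with h <;> omega
    · rw [Nat.div_eq_of_lt (by omega)]
      have : M % 4 = 1 := by omega
      omega
    · have hM2 : M % 4 = 2 := by omega
      rw [hdiv1 hM2, hMd1 hM2]
      split_ifs with h <;> omega
    · have : M % 4 = 3 := by omega
      simp only [Nat.zero_div]
      omega

lemma cntN_step (n i : Nat) : cntN n i ≤ cntN (n + 1) i ∧ cntN (n + 1) i ≤ cntN n i + 1 := by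
  have hq : (0:Nat) < 2 ^ (i+1) := pow_pos (by norm_num) (i+1)
  have hp : (0:Nat) < 2 ^ i := pow_pos (by norm_num) i
  have h2 : (2:Nat) ^ (i+1) = 2 * 2^i := by ring
  have hdm := Nat.div_add_mod n (2 ^ (i+1))
  have hmlt : n % 2 ^ (i+1) < 2 ^ (i+1) := Nat.mod_lt _ hq
  rcases Nat.lt_or_ge (n % 2 ^ (i+1) + 1) (2 ^ (i+1)) with h | h
  · -- same block: (n+1)/q = n/q, (n+1)%q = n%q + 1
    have hd1 : (n+1) / 2 ^ (i+1) = n / 2 ^ (i+1) := by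
      rw [show n + 1 = 2 ^ (i+1) * (n / 2 ^ (i+1)) + (n % 2 ^ (i+1) + 1) from by omega,
        Nat.mul_add_div hq, Nat.div_eq_of_lt h]
      omega
    have hm1 : (n+1) % 2 ^ (i+1) = n % 2 ^ (i+1) + 1 := by
      rw [show n + 1 = 2 ^ (i+1) * (n / 2 ^ (i+1)) + (n % 2 ^ (i+1) + 1) from by omega,
        Nat.mul_add_mod, Nat.mod_eq_of_lt h]
    simp only [cntN, hd1, hm1]
    omega
  · -- block boundary: n%q = q-1, (n+1)/q = n/q + 1, (n+1)%q = 0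
    have hm : n % 2 ^ (i+1) = 2 ^ (i+1) - 1 := by omega
    have hsplit : n + 1 = 2 ^ (i+1) * (n / 2 ^ (i+1) + 1) + 0 := by
      rw [Nat.mul_add, Nat.mul_one]; omega
    have hd1 : (n+1) / 2 ^ (i+1) = n / 2 ^ (i+1) + 1 := by
      rw [hsplit, Nat.mul_add_div hq, Nat.div_eq_of_lt hq]
    have hm1 : (n+1) % 2 ^ (i+1) = 0 := by
      rw [hsplit, Nat.mul_add_mod]
      exact Nat.zero_mod _
    simp only [cntN, hd1, hm1, hm]
    have hmin1 : min (2^i) (2 ^ (i+1) - 1 + 1 - 2^i) = 2^i := by omega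
    have hmin0 : min (2^i) (0 + 1 - 2^i) = 0 := by omega
    rw [hmin1, hmin0]
    have hexp : (n / 2 ^ (i+1) + 1) * 2 ^ i = n / 2 ^ (i+1) * 2 ^ i + 2 ^ i := by ring
    rw [hexp]
    omega

lemma shift_step (T i : Nat) :
    (T >>> i) <<< i = (T / 2 ^ i % 2) * 2 ^ i + (T >>> (i + 1)) <<< (i + 1) := by
  simp only [Nat.shiftLeft_eq, Nat.shiftRight_eq_div_pow]
  have h1 : T / 2 ^ (i + 1) = T / 2 ^ i / 2 := by rw [pow_succ, Nat.div_div_eq_div_mul]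
  rw [h1]
  generalize T / 2 ^ i = x
  have hx : x = 2 * (x / 2) + x % 2 := by omega
  calc x * 2 ^ i = (2 * (x / 2) + x % 2) * 2 ^ i := by rw [← hx]
    _ = x % 2 * 2 ^ i + x / 2 * 2 ^ (i + 1) := by ring

lemma shift_zero_of_lt (T i : Nat) (h : T < 2 ^ i) : (T >>> i) <<< i = 0 := by
  simp [Nat.shiftRight_eq_div_pow, Nat.div_eq_of_lt h]

lemma rowLoop_inv (smallest biggest : Int) (hsb : smallest ≤ biggest)
    (hb : biggest < 2147483648)
    (b a : Nat) (hbeq : b = biggest.toNat) (haeq : a = (max (smallest - 1) 0).toNat) :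
    ∀ (k i : Nat) (acc : Int), 32 ≤ i + k →
      solutionRowLoop smallest biggest i acc
        = acc + (((fN b ^^^ fN a) >>> i) <<< i : Nat) := by
  have hbi : (b : Int) = max biggest 0 := by rw [hbeq]; exact Int.toNat_eq_max biggest
  have hai : (a : Int) = max (smallest - 1) 0 := by
    rw [haeq]; exact Int.toNat_of_nonneg (le_max_right _ _)
  have hab : a ≤ b := by omega
  have hT32 : fN b ^^^ fN a < 2 ^ 32 := by
    have h1 : b < 2 ^ 32 := by omega
    exact Nat.xor_lt_two_pow (fN_lt_pow _ _ h1) (fN_lt_pow _ _ (by omega))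
  intro k
  induction k with
  | zero =>
    intro i acc hik
    rw [solutionRowLoop, dif_neg (by omega)]
    have : fN b ^^^ fN a < 2 ^ i :=
      lt_of_lt_of_le hT32 (Nat.pow_le_pow_right (by norm_num) (by omega))
    rw [shift_zero_of_lt _ _ this]
    simp
  | succ k ih =>
    intro i acc hik
    rw [solutionRowLoop]
    by_cases h32 : i < 32
    · rw [dif_pos h32, powersOfTwo_getD i h32]
      by_cases hguard : (2 : Int) ^ i ≤ biggest
      · rw [if_pos hguard]
        have hp0 : (0 : Int) < 2 ^ i := pow_pos (by norm_num) i
        have hbpos : (1 : Int) ≤ biggest := by omega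
        have hbcast : (b : Int) = biggest := by omega
        have hi31 : i + 1 < 32 := by
          by_contra hcon
          have hi : i = 31 := by omega
          subst hi
          norm_num at hguard
          omega
        rw [dif_pos hi31, powersOfTwo_getD (i + 1) hi31]
        have hpow : ((2 : Int) ^ i) = ((2 ^ i : Nat) : Int) := by push_cast; ring
        have hpow1 : ((2 : Int) ^ (i + 1)) = ((2 ^ (i + 1) : Nat) : Int) := by push_cast; ring
        have hnb : count_numbers_with_same_bit biggest ((2:Int) ^ i) ((2:Int) ^ (i + 1))
            = (cntN b i : Int) := by
          rw [← hbcast, hpow, hpow1]; exact cnt_cast b i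
        have hna : count_numbers_with_same_bit (max (smallest - 1) 0) ((2:Int) ^ i) ((2:Int) ^ (i + 1))
            = (cntN a i : Int) := by
          rw [← hai, hpow, hpow1]; exact cnt_cast a i
        simp only [hnb, hna]
        have hbit : (fN b ^^^ fN a) / 2 ^ i % 2 = (fN b / 2 ^ i % 2 + fN a / 2 ^ i % 2) % 2 :=
          xor_div_pow_parity _ _ i
        have hparb := cntN_parity b i
        have hpara := cntN_parity a i
        have hmod2 : PySem.Int.mod ((cntN b i : Int) - (cntN a i : Int)) 2
            = ((cntN b i : Int) - (cntN a i : Int)) % 2 := PySem.Int.mod_eq_emod_of_pos (by norm_num)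
        have hcond :
            (if smallest = biggest ∧ (cntN b i : Int) - (cntN a i : Int) ≠ 0 then acc + (2:Int) ^ i
             else if PySem.Int.mod ((cntN b i : Int) - (cntN a i : Int)) 2 ≠ 0 then acc + (2:Int) ^ i
             else acc)
            = acc + (((fN b ^^^ fN a) / 2 ^ i % 2 : Nat) : Int) * (2 : Int) ^ i := by
          have hb2 : fN b / 2 ^ i % 2 < 2 := Nat.mod_lt _ (by norm_num)
          have ha2 : fN a / 2 ^ i % 2 < 2 := Nat.mod_lt _ (by norm_num)
          by_cases hsb2 : smallest = biggest
          · have hab1 : a + 1 = b := by omega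
            have hstep : cntN a i ≤ cntN b i ∧ cntN b i ≤ cntN a i + 1 := by
              have h := cntN_step a i; rw [hab1] at h; exact h
            by_cases hne : (cntN b i : Int) - (cntN a i : Int) ≠ 0
            · rw [if_pos ⟨hsb2, hne⟩]
              have hone : ((fN b ^^^ fN a) / 2 ^ i % 2 : Nat) = 1 := by omega
              rw [hone]; push_cast; ring
            · rw [if_neg (by tauto), hmod2, if_neg (by omega)]
              have hzero : ((fN b ^^^ fN a) / 2 ^ i % 2 : Nat) = 0 := by omega
              rw [hzero]; push_cast; ring
          · rw [if_neg (by tauto), hmod2]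
            by_cases hpar : ((cntN b i : Int) - (cntN a i : Int)) % 2 ≠ 0
            · rw [if_pos hpar]
              have hone : ((fN b ^^^ fN a) / 2 ^ i % 2 : Nat) = 1 := by omega
              rw [hone]; push_cast; ring
            · rw [if_neg hpar]
              have hzero : ((fN b ^^^ fN a) / 2 ^ i % 2 : Nat) = 0 := by omega
              rw [hzero]; push_cast; ring
        rw [hcond, ih (i + 1) _ (by omega), shift_step (fN b ^^^ fN a) i]
        push_cast
        ring
      · rw [if_neg hguard]
        have h2 : ((2 ^ i : Nat) : Int) = (2 : Int) ^ i := by push_cast; ring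
        have hp0 : (0 : Int) < 2 ^ i := pow_pos (by norm_num) i
        have hblt : b < 2 ^ i := by omega
        have : fN b ^^^ fN a < 2 ^ i :=
          Nat.xor_lt_two_pow (fN_lt_pow _ _ hblt) (fN_lt_pow _ _ (by omega))
        rw [shift_zero_of_lt _ _ this]
        simp
    · rw [dif_neg h32]
      have : fN b ^^^ fN a < 2 ^ i :=
        lt_of_lt_of_le hT32 (Nat.pow_le_pow_right (by norm_num) (by omega))
      rw [shift_zero_of_lt _ _ this]
      simp

lemma row_eq (smallest biggest : Int) (hsb : smallest ≤ biggest) (hb : biggest < 2147483648) :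
    solutionRowLoop smallest biggest 0 0
      = PySem.Int.bxor (xorUpto biggest) (xorUpto (max (smallest - 1) 0)) := by
  have hinv := rowLoop_inv smallest biggest hsb hb biggest.toNat (max (smallest - 1) 0).toNat
    rfl rfl 32 0 0 (by omega)
  rw [hinv]
  have hacast : ((max (smallest - 1) 0 : Int).toNat : Int) = max (smallest - 1) 0 :=
    Int.toNat_of_nonneg (le_max_right _ _)
  rcases le_or_gt 0 biggest with hbn | hbn
  · have hbcast : ((biggest.toNat : Nat) : Int) = biggest := Int.toNat_of_nonneg hbn
    rw [← hbcast, ← hacast, xorUpto_natCast, xorUpto_natCast, PySem.Int.bxor_natCast]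
    simp [Nat.shiftRight_eq_div_pow, Nat.shiftLeft_eq]
    have hmx : (max biggest 0).toNat = biggest.toNat := by omega
    rw [hmx]
  · -- biggest < 0 : both sides are 0
    have h1 : biggest.toNat = 0 := by omega
    have h2 : (max (smallest - 1) 0 : Int).toNat = 0 := by omega
    rw [h1, h2]
    have hx : xorUpto biggest = 0 := by
      unfold xorUpto; rw [if_pos hbn]
    have hy : xorUpto (max (smallest - 1) 0) = 0 := by
      rw [← hacast, h2]; decide
    rw [hx, hy]
    decide

-- ===== VERDICT (by name: the statement is the Claim_ definition above) =====
theorem solution_spec : Claim_equal_solution := by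
  intro start length _hdom hpre
  show solution start length = solution_alt start length

  obtain ⟨hlen, hbound⟩ := hpre
  -- each row's loop equals the closed form
  have hrow : ∀ row : Int, 0 ≤ row → row < length →
      solutionRowLoop (start + row * length) (start + row * length + length - row - 1) 0 0
        = PySem.Int.bxor (xorUpto (start + row * length + length - row - 1))
            (xorUpto (max (start + row * length - 1) 0)) := by
    intro row h0 h1
    apply row_eq
    · omega
    · have hA : start + row * length + length - row - 1 = start + (row + 1) * (length - 1) := by ring
      have hB : (row + 1) * (length - 1) ≤ length * (length - 1) :=
        mul_le_mul_of_nonneg_right (by omega) (by omega)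
      have hC : length * (length - 1) = length * length - length := by ring
      omega
  -- peel the first row (length ≥ 1)
  have hcons : PySem.List.pyRange 0 length 1 = 0 :: PySem.List.pyRange 1 length 1 := by
    have := PySem.List.pyRange_one_cons (show (0:Int) < length by omega)
    simpa using this
  simp only [solution, solution_alt, hcons, List.map_cons, List.foldl_cons, List.foldl_map]
  have h00 : PySem.Int.bxor 0
      (PySem.Int.bxor (xorUpto (start + 0 * length + length - 0 - 1))
        (xorUpto (max (start + 0 * length - 1) 0)))
      = solutionRowLoop (start + 0 * length) (start + 0 * length + length - 0 - 1) 0 0 := by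
    rw [PySem.Int.bxor_comm, PySem.Int.bxor_zero, hrow 0 le_rfl (by omega)]
  rw [h00]
  apply PySem.List.foldl_congr_mem
  intro acc row hmem
  rw [PySem.List.mem_pyRange_one] at hmem
  rw [hrow row (by omega) (by omega)]
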